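-- pv_equiv track=rewrite | github.com/vijai021096/Trading | nifty-alpha-bot/backtest/daily_backtest_engine.py | _strategies_scan_order
-- ===== SOURCE A (Python) =====
-- from typing import Any, Dict, List, Optional, Tuple
--
-- STRATEGY_PRIORITY = {
--     "STRONG_TREND_UP":   ["BREAKOUT_MOMENTUM", "TREND_CONTINUATION", "EMA_FRESH_CROSS"],
--     "STRONG_TREND_DOWN": ["BREAKOUT_MOMENTUM", "TREND_CONTINUATION", "EMA_FRESH_CROSS"],
--     "MILD_TREND":        ["EMA_FRESH_CROSS", "TREND_CONTINUATION", "BREAKOUT_MOMENTUM", "VWAP_CROSS", "GAP_FADE", "INSIDE_BAR_BREAK"],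
--     "MEAN_REVERT":       ["RANGE_BOUNCE", "GAP_FADE", "REVERSAL_SNAP", "VWAP_CROSS", "INSIDE_BAR_BREAK"],
--     "BREAKOUT":          ["BREAKOUT_MOMENTUM", "EMA_FRESH_CROSS", "INSIDE_BAR_BREAK", "TREND_CONTINUATION", "GAP_FADE"],
--     "VOLATILE":          ["GAP_FADE", "REVERSAL_SNAP"],  # EMA_FRESH_CROSS excluded — VIX too high
-- }
--
-- def _strategies_scan_order(regime: str, allowed: set) -> List[str]:
--     """Regime priority first, then remaining allowed strategies (for volume + 2nd slot)."""
--     pri = STRATEGY_PRIORITY.get(regime, STRATEGY_PRIORITY["MEAN_REVERT"])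
--     seen: set = set()
--     out: List[str] = []
--     for s in pri:
--         if s in allowed and s not in seen:
--             out.append(s)
--             seen.add(s)
--     for s in sorted(allowed):
--         if s not in seen:
--             out.append(s)
--             seen.add(s)
--     return out
-- ===== SOURCE B (Python) =====
-- STRATEGY_PRIORITY = {
--     "STRONG_TREND_UP":   ["BREAKOUT_MOMENTUM", "TREND_CONTINUATION", "EMA_FRESH_CROSS"],
--     "STRONG_TREND_DOWN": ["BREAKOUT_MOMENTUM", "TREND_CONTINUATION", "EMA_FRESH_CROSS"],
--     "MILD_TREND":        ["EMA_FRESH_CROSS", "TREND_CONTINUATION", "BREAKOUT_MOMENTUM", "VWAP_CROSS", "GAP_FADE", "INSIDE_BAR_BREAK"],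
--     "MEAN_REVERT":       ["RANGE_BOUNCE", "GAP_FADE", "REVERSAL_SNAP", "VWAP_CROSS", "INSIDE_BAR_BREAK"],
--     "BREAKOUT":          ["BREAKOUT_MOMENTUM", "EMA_FRESH_CROSS", "INSIDE_BAR_BREAK", "TREND_CONTINUATION", "GAP_FADE"],
--     "VOLATILE":          ["GAP_FADE", "REVERSAL_SNAP"],
-- }
--
-- def _strategies_scan_order(regime: str, allowed: set):
--     """Single composite-key sort: priority index first, then name alphabetically."""
--     pri = STRATEGY_PRIORITY.get(regime, STRATEGY_PRIORITY["MEAN_REVERT"])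
--     rank = {s: i for i, s in enumerate(pri)}
--     return sorted(allowed, key=lambda s: (rank.get(s, len(pri)), s))
-- ===== Notes on version B (the rewrite author's own statement) =====
-- stated objective: simpler
-- what changed: Replaces A's two passes with a mutable seen-set (priority scan, then sorted-remainder scan) by one sorted() call over allowed with a composite key (priority index from a rank dict, falling back to len(pri), then the name), so the partition and the seen bookkeeping disappear.
import Mathlib
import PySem

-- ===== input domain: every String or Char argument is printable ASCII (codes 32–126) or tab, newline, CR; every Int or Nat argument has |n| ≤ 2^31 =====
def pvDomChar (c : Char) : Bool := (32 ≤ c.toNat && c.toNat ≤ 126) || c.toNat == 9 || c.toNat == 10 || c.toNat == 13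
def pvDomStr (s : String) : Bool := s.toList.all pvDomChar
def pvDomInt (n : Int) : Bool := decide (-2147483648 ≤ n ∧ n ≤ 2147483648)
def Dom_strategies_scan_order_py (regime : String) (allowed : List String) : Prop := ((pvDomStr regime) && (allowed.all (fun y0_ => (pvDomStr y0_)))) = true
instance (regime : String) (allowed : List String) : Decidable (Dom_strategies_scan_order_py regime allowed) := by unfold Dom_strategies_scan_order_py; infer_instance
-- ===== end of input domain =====

-- B replaces A's two passes with a seen-set by a single composite-key sort (priority index, then name); same cost, simpler.
-- A's 'allowed' parameter is a Python set, modelled as a duplicate-free List String.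

-- shared module-level constant
def STRATEGY_PRIORITY : PySem.Dict String (List String) :=
  ⟨[ ("STRONG_TREND_UP",   ["BREAKOUT_MOMENTUM", "TREND_CONTINUATION", "EMA_FRESH_CROSS"]),
    ("STRONG_TREND_DOWN", ["BREAKOUT_MOMENTUM", "TREND_CONTINUATION", "EMA_FRESH_CROSS"]),
    ("MILD_TREND",        ["EMA_FRESH_CROSS", "TREND_CONTINUATION", "BREAKOUT_MOMENTUM", "VWAP_CROSS", "GAP_FADE", "INSIDE_BAR_BREAK"]),
    ("MEAN_REVERT",       ["RANGE_BOUNCE", "GAP_FADE", "REVERSAL_SNAP", "VWAP_CROSS", "INSIDE_BAR_BREAK"]),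
    ("BREAKOUT",          ["BREAKOUT_MOMENTUM", "EMA_FRESH_CROSS", "INSIDE_BAR_BREAK", "TREND_CONTINUATION", "GAP_FADE"]),
    ("VOLATILE",          ["GAP_FADE", "REVERSAL_SNAP"]) ]⟩

-- ===== PORT A =====
def strategies_scan_order_py (regime : String) (allowed : List String) : List String :=
  let pri := (PySem.Dict.get? STRATEGY_PRIORITY regime).getD
               ((PySem.Dict.get? STRATEGY_PRIORITY "MEAN_REVERT").getD [])
  -- for s in pri: if s in allowed and s not in seen: out.append(s); seen.add(s)
  let st1 := pri.foldl
    (fun (st : List String × PySem.Set String) s =>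
      if allowed.contains s && !(PySem.Set.contains st.2 s) then (st.1 ++ [s], PySem.Set.add st.2 s) else st)
    ([], PySem.Set.empty)
  -- for s in sorted(allowed): if s not in seen: out.append(s); seen.add(s)
  let st2 := (PySem.List.sorted allowed (fun x => x)).foldl
    (fun (st : List String × PySem.Set String) s =>
      if !(PySem.Set.contains st.2 s) then (st.1 ++ [s], PySem.Set.add st.2 s) else st)
    st1
  st2.1

-- ===== PORT B =====
-- key=lambda s: (rank.get(s, len(pri)), s) — the Python tuple key compares lexicographically, modelled by Lex (Int × String)
def strategies_scan_order_py_alt (regime : String) (allowed : List String) : List String :=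
  let pri := (PySem.Dict.get? STRATEGY_PRIORITY regime).getD
               ((PySem.Dict.get? STRATEGY_PRIORITY "MEAN_REVERT").getD [])
  let rank : PySem.Dict String Int :=
    (PySem.List.enumerate pri).foldl (fun d p => PySem.Dict.insert d p.2 p.1) ⟨[]⟩
  PySem.List.sorted allowed (fun s => toLex (PySem.Dict.getD rank s (pri.length : Int), s))

-- ===== PRECONDITION & SPEC =====
-- 'allowed' is a Python set: its model is a list of DISTINCT strings (this excludes no actual Python input).
def Pre_strategies_scan_order_py (regime : String) (allowed : List String) : Prop := allowed.Nodup
instance (regime : String) (allowed : List String) : Decidable (Pre_strategies_scan_order_py regime allowed) := by unfold Pre_strategies_scan_order_py; infer_instance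
def pvWitness_strategies_scan_order_py : String × List String :=
  ("MILD_TREND", ["GAP_FADE", "AAA", "EMA_FRESH_CROSS"])
def Spec_strategies_scan_order_py (regime : String) (allowed : List String) (out : List String) : Prop := out = strategies_scan_order_py_alt regime allowed
instance (regime : String) (allowed : List String) (out : List String) : Decidable (Spec_strategies_scan_order_py regime allowed out) := by unfold Spec_strategies_scan_order_py; infer_instance

-- ===== CLAIM (what is proved, stated in full; the proofs are below) =====
def Claim_equal_strategies_scan_order_py : Prop := ∀ (regime : String) (allowed : List String), Dom_strategies_scan_order_py regime allowed → Pre_strategies_scan_order_py regime allowed → Spec_strategies_scan_order_py regime allowed (strategies_scan_order_py regime allowed)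

-- ===== LEMMAS AND PROOFS =====

-- the priority list picked for any regime has no duplicates
theorem pri_nodup (regime : String) :
    ((PySem.Dict.get? STRATEGY_PRIORITY regime).getD
      ((PySem.Dict.get? STRATEGY_PRIORITY "MEAN_REVERT").getD [])).Nodup := by
  simp only [STRATEGY_PRIORITY, PySem.Dict.get?_mk_cons]
  split_ifs <;> simp [PySem.Dict.get?]

-- loop 1 of A: appends, in pri order, the allowed strategies; seen ends as the same list
theorem loop1_eq (allowed : List String) :
    ∀ (pri : List String) (out seen : List String), pri.Nodup →
      (∀ s ∈ pri, s ∉ seen) →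
      pri.foldl
        (fun (st : List String × PySem.Set String) s =>
          if allowed.contains s && !(PySem.Set.contains st.2 s) then (st.1 ++ [s], PySem.Set.add st.2 s) else st)
        (out, seen)
      = (out ++ pri.filter (fun s => allowed.contains s), seen ++ pri.filter (fun s => allowed.contains s)) := by
  intro pri
  induction pri with
  | nil => simp
  | cons x t ih =>
    intro out seen hnd hns
    have hxs : x ∉ seen := hns x (List.mem_cons_self)
    have hxt : x ∉ t := (List.nodup_cons.mp hnd).1
    rw [List.foldl_cons]
    by_cases ha : allowed.contains x = true
    · have ha' : x ∈ allowed := by simpa [List.contains_eq_mem] using ha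
      rw [if_pos (by simp [PySem.Set.contains, List.contains_eq_mem, ha', hxs])]
      have hred : (((out, seen).1 ++ [x], PySem.Set.add (out, seen).2 x) : List String × PySem.Set String)
          = (out ++ [x], seen ++ [x]) := by
        simp [PySem.Set.add, PySem.Set.contains, List.contains_eq_mem, hxs]
      rw [hred, ih (out ++ [x]) (seen ++ [x]) (List.nodup_cons.mp hnd).2
            (fun s hs => by
              simp only [List.mem_append, List.mem_singleton, not_or]
              exact ⟨hns s (List.mem_cons_of_mem _ hs), fun h => hxt (h ▸ hs)⟩)]
      simp [ha']
    · have ha0 : x ∉ allowed := by simpa [List.contains_eq_mem, Bool.not_eq_true] using ha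
      rw [if_neg (by simp [List.contains_eq_mem, ha0])]
      rw [ih out seen (List.nodup_cons.mp hnd).2 (fun s hs => hns s (List.mem_cons_of_mem _ hs))]
      simp [ha0]

-- loop 2 of A: appends each not-yet-seen element once
theorem loop2_eq :
    ∀ (l : List String) (out seen : List String), l.Nodup →
      (l.foldl
        (fun (st : List String × PySem.Set String) s =>
          if !(PySem.Set.contains st.2 s) then (st.1 ++ [s], PySem.Set.add st.2 s) else st)
        (out, seen)).1
      = out ++ l.filter (fun s => !seen.contains s) := by
  intro l
  induction l with
  | nil => simp
  | cons x t ih =>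
    intro out seen hnd
    have hxt : x ∉ t := (List.nodup_cons.mp hnd).1
    rw [List.foldl_cons]
    by_cases hc : x ∈ seen
    · rw [if_neg (by simp [PySem.Set.contains, List.contains_eq_mem, hc])]
      rw [ih out seen (List.nodup_cons.mp hnd).2]
      simp [List.contains_eq_mem, hc]
    · rw [if_pos (by simp [PySem.Set.contains, List.contains_eq_mem, hc])]
      have hred : (((out, seen).1 ++ [x], PySem.Set.add (out, seen).2 x) : List String × PySem.Set String)
          = (out ++ [x], seen ++ [x]) := by
        simp [PySem.Set.add, PySem.Set.contains, List.contains_eq_mem, hc]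
      rw [hred, ih (out ++ [x]) (seen ++ [x]) (List.nodup_cons.mp hnd).2]
      rw [List.filter_congr (l := t)
        (p := fun s => !(seen ++ [x]).contains s) (q := fun s => !seen.contains s)
        (fun s hs => by
          have hsx : s ≠ x := fun h => hxt (h ▸ hs)
          simp [List.contains_eq_mem, hsx])]
      simp [List.contains_eq_mem, hc]

-- the rank dictionary of B: first-occurrence index, default = length
theorem rank_get? (s : String) :
    ∀ (pri : List String) (d : PySem.Dict String Int) (base : Int), pri.Nodup →
      PySem.Dict.get? ((PySem.List.enumerate pri base).foldl (fun d p => PySem.Dict.insert d p.2 p.1) d) s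
      = if s ∈ pri then some (base + (pri.idxOf s : Int)) else PySem.Dict.get? d s := by
  intro pri
  induction pri with
  | nil => simp [PySem.List.enumerate]
  | cons x t ih =>
    intro d base hnd
    rw [PySem.List.enumerate_cons]
    simp only [List.foldl_cons]
    rw [ih (PySem.Dict.insert d x base) (base + 1) (List.nodup_cons.mp hnd).2]
    by_cases hx : s = x
    · subst hx
      have hst : s ∉ t := (List.nodup_cons.mp hnd).1
      simp [hst, PySem.Dict.get?_insert_self, List.idxOf_cons_self]
    · by_cases ht : s ∈ t
      · have : List.idxOf s (x :: t) = (List.idxOf s t).succ := List.idxOf_cons_ne t (Ne.symm hx)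
        simp only [ht, if_true, List.mem_cons, hx, false_or, this]
        push_cast
        ring_nf
      · simp [ht, hx, PySem.Dict.get?_insert_of_ne d base hx]

theorem rankD_mem {pri : List String} {s : String} (hnd : pri.Nodup) (hs : s ∈ pri) (d0 : Int) :
    PySem.Dict.getD ((PySem.List.enumerate pri).foldl (fun d p => PySem.Dict.insert d p.2 p.1) ⟨[]⟩) s d0
    = (pri.idxOf s : Int) := by
  unfold PySem.Dict.getD
  rw [rank_get? s pri ⟨[]⟩ 0 hnd]
  simp [hs]

theorem rankD_not_mem {pri : List String} {s : String} (hnd : pri.Nodup) (hs : s ∉ pri) (d0 : Int) :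
    PySem.Dict.getD ((PySem.List.enumerate pri).foldl (fun d p => PySem.Dict.insert d p.2 p.1) ⟨[]⟩) s d0 = d0 := by
  unfold PySem.Dict.getD
  rw [rank_get? s pri ⟨[]⟩ 0 hnd]
  simp [hs, PySem.Dict.get?]

-- a duplicate-free list is strictly increasing in idxOf
theorem pairwise_idxOf {l : List String} (h : l.Nodup) :
    l.Pairwise (fun a b => List.idxOf a l < List.idxOf b l) := by
  rw [List.pairwise_iff_getElem]
  intro i j hi hj hij
  rw [h.idxOf_getElem i hi, h.idxOf_getElem j hj]
  exact hij

-- ===== VERDICT (by name: the statement is the Claim_ definition above) =====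
theorem strategies_scan_order_py_spec : Claim_equal_strategies_scan_order_py := by
  intro regime allowed _hdom hpre
  unfold Spec_strategies_scan_order_py strategies_scan_order_py strategies_scan_order_py_alt
  set pri := (PySem.Dict.get? STRATEGY_PRIORITY regime).getD
      ((PySem.Dict.get? STRATEGY_PRIORITY "MEAN_REVERT").getD []) with hpri
  have hndp : pri.Nodup := pri_nodup regime
  have hnda : allowed.Nodup := hpre
  set SA := PySem.List.sorted allowed (fun x => x) with hSA
  have hSAperm : SA.Perm allowed := PySem.List.sorted_perm allowed (fun x => x) false
  have hndSA : SA.Nodup := (hSAperm.symm).nodup hnda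
  set pf := pri.filter (fun s => allowed.contains s) with hpf
  have hndpf : pf.Nodup := hndp.filter _
  set n : Int := (pri.length : Int) with hn
  set rank := (PySem.List.enumerate pri).foldl (fun d p => PySem.Dict.insert d p.2 p.1)
      (⟨[]⟩ : PySem.Dict String Int) with hrank
  set key := fun s => toLex (PySem.Dict.getD rank s n, s) with hkey
  set tail := SA.filter (fun s => !pf.contains s) with htail
  show (List.foldl
      (fun (st : List String × PySem.Set String) s =>
        if !(PySem.Set.contains st.2 s) then (st.1 ++ [s], PySem.Set.add st.2 s) else st)
      (List.foldl
        (fun (st : List String × PySem.Set String) s =>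
          if allowed.contains s && !(PySem.Set.contains st.2 s) then (st.1 ++ [s], PySem.Set.add st.2 s) else st)
        ([], PySem.Set.empty) pri) SA).1
    = PySem.List.sorted allowed key
  have hA : List.foldl
      (fun (st : List String × PySem.Set String) s =>
        if allowed.contains s && !(PySem.Set.contains st.2 s) then (st.1 ++ [s], PySem.Set.add st.2 s) else st)
      ([], PySem.Set.empty) pri = (pf, pf) := by
    simpa [hpf, List.contains_eq_mem] using loop1_eq allowed pri [] [] hndp (fun s _ h => List.not_mem_nil h)
  rw [hA, loop2_eq SA pf pf hndSA, ← htail]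
  -- facts about membership
  have hmem_pf : ∀ {x}, x ∈ pf ↔ x ∈ pri ∧ x ∈ allowed := by
    intro x; simp [hpf, List.mem_filter, List.contains_eq_mem]
  have hmem_tail : ∀ {x}, x ∈ tail → x ∈ allowed ∧ x ∉ pri := by
    intro x hx
    rw [htail, List.mem_filter] at hx
    obtain ⟨hxs, hnp⟩ := hx
    have hxa : x ∈ allowed := hSAperm.mem_iff.mp hxs
    refine ⟨hxa, fun hxp => ?_⟩
    simp [List.contains_eq_mem, hmem_pf.mpr ⟨hxp, hxa⟩] at hnp
  -- permutation
  have hperm : (pf ++ tail).Perm allowed := by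
    have h1 : pf.Perm (SA.filter (fun s => pf.contains s)) := by
      rw [List.perm_ext_iff_of_nodup hndpf (hndSA.filter _)]
      intro a
      simp only [List.mem_filter, List.contains_eq_mem, decide_eq_true_eq]
      constructor
      · intro ha; exact ⟨hSAperm.mem_iff.mpr (hmem_pf.mp ha).2, ha⟩
      · intro ⟨_, ha⟩; exact ha
    exact (h1.append_right tail).trans
      ((List.filter_append_perm (fun s => pf.contains s) SA).trans hSAperm)
  -- pairwise strictly increasing keys along A's output
  have hkey_pf : ∀ {x}, x ∈ pf → key x = toLex ((List.idxOf x pri : Int), x) := by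
    intro x hx
    simp only [hkey, hrank, rankD_mem hndp (hmem_pf.mp hx).1 n]
  have hkey_tail : ∀ {x}, x ∈ tail → key x = toLex (n, x) := by
    intro x hx
    simp only [hkey, hrank, rankD_not_mem hndp (hmem_tail hx).2 n]
  have hpw : (pf ++ tail).Pairwise (fun a b => key a < key b) := by
    rw [List.pairwise_append]
    refine ⟨?_, ?_, ?_⟩
    · refine ((pairwise_idxOf hndp).filter _).imp_of_mem ?_
      intro a b ha hb hab
      rw [← hpf] at ha hb
      rw [hkey_pf ha, hkey_pf hb]
      simp only [Prod.Lex.lt_iff, ofLex_toLex]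
      left; exact_mod_cast hab
    · have hle : SA.Pairwise (fun a b => a ≤ b) := PySem.List.sorted_pairwise allowed (fun x => x)
      have hlt : SA.Pairwise (fun a b => a < b) :=
        (hle.and hndSA).imp (fun h => lt_of_le_of_ne h.1 h.2)
      refine (hlt.filter _).imp_of_mem ?_
      intro a b ha hb hab
      rw [← htail] at ha hb
      rw [hkey_tail ha, hkey_tail hb]
      simp only [Prod.Lex.lt_iff, ofLex_toLex]
      right; exact ⟨by trivial, hab⟩
    · intro a ha b hb
      rw [hkey_pf ha, hkey_tail hb]
      simp only [Prod.Lex.lt_iff, ofLex_toLex]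
      left
      have : List.idxOf a pri < pri.length := List.idxOf_lt_length_iff.mpr (hmem_pf.mp ha).1
      simp only [hn]
      exact_mod_cast this
  exact (PySem.List.sorted_eq_of_perm_of_pairwise_lt allowed (pf ++ tail) key hperm hpw).symm
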